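-- pv_equiv track=rewrite | github.com/cancelpt/media-filename-parser | nlp/ner/train_media_filename_ner.py | select_non_overlapping_span
-- ===== SOURCE A (Python) =====
-- from typing import Any, Dict, Iterable, List, Optional, Sequence, Tuple
--
-- def dedupe_spans(spans: Iterable[Tuple[int, int]]) -> List[Tuple[int, int]]:
--     seen = set()
--     out: List[Tuple[int, int]] = []
--     for span in spans:
--         if span in seen:
--             continue
--         seen.add(span)
--         out.append(span)
--     return out
--
-- def span_is_free(start: int, end: int, occupied: Sequence[bool]) -> bool:
--     if start < 0 or end <= start or end > len(occupied):
--         return False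
--     return not any(occupied[start:end])
--
-- def select_non_overlapping_span(
--     spans: Iterable[Tuple[int, int]],
--     occupied: Sequence[bool],
--     prefer_right: bool,
-- ) -> Optional[Tuple[int, int]]:
--     candidates = dedupe_spans(spans)
--     if not candidates:
--         return None
--
--     # Prefer longer matches when start ties.
--     if prefer_right:
--         candidates.sort(key=lambda x: (-x[0], -(x[1] - x[0])))
--     else:
--         candidates.sort(key=lambda x: (x[0], -(x[1] - x[0])))
--
--     for start, end in candidates:
--         if span_is_free(start, end, occupied):
--             return start, end
--     return None
-- ===== SOURCE B (Python) =====
-- def select_non_overlapping_span(spans, occupied, prefer_right):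
--     # Freeness via a prefix-sum array of occupied instead of a per-candidate slice scan.
--     n = len(occupied)
--     pre = [0]
--     c = 0
--     for b in occupied:
--         c += 1 if b else 0
--         pre.append(c)
--     if prefer_right:
--         key = lambda x: (-x[0], x[0] - x[1])
--     else:
--         key = lambda x: (x[0], x[0] - x[1])
--     for s, e in sorted(set(spans), key=key):
--         if 0 <= s < e <= n and pre[s] == pre[e]:
--             return (s, e)
--     return None
-- ===== Notes on version B (the rewrite author's own statement) =====
-- stated objective: alternative
-- what changed: B precomputes a prefix-sum array of occupied and checks freeness by comparing two prefix sums instead of scanning a slice, and dedupes with set() before sorting (the sort key is injective on distinct spans) instead of A's explicit seen-set loop.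
import Mathlib
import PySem

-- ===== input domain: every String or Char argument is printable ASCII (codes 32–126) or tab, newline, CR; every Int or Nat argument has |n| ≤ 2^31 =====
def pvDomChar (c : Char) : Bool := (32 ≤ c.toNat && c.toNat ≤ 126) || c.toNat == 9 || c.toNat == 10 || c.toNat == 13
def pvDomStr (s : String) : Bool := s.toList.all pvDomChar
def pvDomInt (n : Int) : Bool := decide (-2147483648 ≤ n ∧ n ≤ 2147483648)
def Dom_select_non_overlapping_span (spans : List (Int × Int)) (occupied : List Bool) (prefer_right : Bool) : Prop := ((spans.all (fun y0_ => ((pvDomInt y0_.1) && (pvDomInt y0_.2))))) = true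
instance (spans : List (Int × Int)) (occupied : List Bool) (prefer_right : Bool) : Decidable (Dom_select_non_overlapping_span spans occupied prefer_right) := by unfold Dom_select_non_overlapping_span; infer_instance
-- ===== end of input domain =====

-- B checks span freeness by comparing two entries of a precomputed prefix-sum array of
-- `occupied` instead of scanning a slice, and dedupes with set() before sorting (alternative
-- decomposition, same return values).

-- ===== PORT A =====
def dedupe_spans (spans : List (Int × Int)) : List (Int × Int) :=
  (spans.foldl
    (fun st span =>
      if PySem.Set.contains st.1 span then st
      else (PySem.Set.add st.1 span, st.2 ++ [span]))
    ((PySem.Set.empty : PySem.Set (Int × Int)), ([] : List (Int × Int)))).2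

def span_is_free (start : Int) (end_ : Int) (occupied : List Bool) : Bool :=
  if start < 0 || end_ ≤ start || end_ > (occupied.length : Int) then false
  else !(PySem.List.slice occupied (some start) (some end_)).any (fun b => b)

def selLoop (occupied : List Bool) : List (Int × Int) → Option (Int × Int)
  | [] => none
  | (s, e) :: rest => if span_is_free s e occupied then some (s, e) else selLoop occupied rest

def select_non_overlapping_span (spans : List (Int × Int)) (occupied : List Bool) (prefer_right : Bool) : Option (Int × Int) :=
  let candidates := dedupe_spans spans
  if candidates = [] then none
  else
    let sortedC :=
      if prefer_right then
        PySem.List.sorted2 candidates (fun x => -x.1) (fun x => -(x.2 - x.1)) false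
      else
        PySem.List.sorted2 candidates (fun x => x.1) (fun x => -(x.2 - x.1)) false
    selLoop occupied sortedC

-- ===== PORT B =====
def altPrefix (occupied : List Bool) : List Int :=
  (occupied.foldl
    (fun st b => (st.1 ++ [st.2 + (if b then 1 else 0)], st.2 + (if b then 1 else 0)))
    (([0] : List Int), (0 : Int))).1

def altLoop (pre : List Int) (n : Int) : List (Int × Int) → Option (Int × Int)
  | [] => none
  | (s, e) :: rest =>
      if 0 ≤ s ∧ s < e ∧ e ≤ n ∧ PySem.List.pyGetD pre s 0 = PySem.List.pyGetD pre e 0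
      then some (s, e) else altLoop pre n rest

def select_non_overlapping_span_alt (spans : List (Int × Int)) (occupied : List Bool) (prefer_right : Bool) : Option (Int × Int) :=
  let n : Int := occupied.length
  let pre := altPrefix occupied
  let sortedC :=
    if prefer_right then
      PySem.List.sorted2 (PySem.Set.ofList spans) (fun x => -x.1) (fun x => x.1 - x.2) false
    else
      PySem.List.sorted2 (PySem.Set.ofList spans) (fun x => x.1) (fun x => x.1 - x.2) false
  altLoop pre n sortedC

-- ===== PRECONDITION & SPEC =====
def Spec_select_non_overlapping_span (spans : List (Int × Int)) (occupied : List Bool) (prefer_right : Bool) (out : Option (Int × Int)) : Prop := out = select_non_overlapping_span_alt spans occupied prefer_right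
instance (spans : List (Int × Int)) (occupied : List Bool) (prefer_right : Bool) (out : Option (Int × Int)) : Decidable (Spec_select_non_overlapping_span spans occupied prefer_right out) := by unfold Spec_select_non_overlapping_span; infer_instance

-- ===== CLAIM (what is proved, stated in full; the proofs are below) =====
def Claim_equal_select_non_overlapping_span : Prop := ∀ (spans : List (Int × Int)) (occupied : List Bool) (prefer_right : Bool), Dom_select_non_overlapping_span spans occupied prefer_right → Spec_select_non_overlapping_span spans occupied prefer_right (select_non_overlapping_span spans occupied prefer_right)

-- ===== LEMMAS AND PROOFS =====

-- A's dedupe loop builds exactly set(spans) in first-occurrence order.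
theorem dedupe_fold_eq (l : List (Int × Int)) (s : PySem.Set (Int × Int)) :
    l.foldl
      (fun st span =>
        if PySem.Set.contains st.1 span then st
        else (PySem.Set.add st.1 span, st.2 ++ [span]))
      (s, (s : List (Int × Int)))
      = (l.foldl PySem.Set.add s, l.foldl PySem.Set.add s) := by
  induction l generalizing s with
  | nil => rfl
  | cons x t ih =>
    have hstep : (if PySem.Set.contains s x then (s, (s : List (Int × Int)))
        else (PySem.Set.add s x, (s : List (Int × Int)) ++ [x]))
        = (PySem.Set.add s x, (PySem.Set.add s x : List (Int × Int))) := by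
      by_cases h : x ∈ s <;> simp [PySem.Set.add, h]
    simp only [List.foldl_cons]
    rw [show (if PySem.Set.contains s x then (s, (s : List (Int × Int)))
        else (PySem.Set.add s x, (s : List (Int × Int)) ++ [x]))
        = (PySem.Set.add s x, (PySem.Set.add s x : List (Int × Int))) from hstep]
    exact ih (PySem.Set.add s x)

theorem dedupe_eq_ofList (spans : List (Int × Int)) :
    dedupe_spans spans = PySem.Set.ofList spans := by
  unfold dedupe_spans
  rw [show ((PySem.Set.empty : PySem.Set (Int × Int)), ([] : List (Int × Int)))
        = ((PySem.Set.empty : PySem.Set (Int × Int)),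
           ((PySem.Set.empty : PySem.Set (Int × Int)) : List (Int × Int))) from rfl,
     dedupe_fold_eq, PySem.Set.ofList_eq_foldl]
  rfl

-- partial sums of the prefix loop
def psums : List Bool → Int → List Int
  | [], _ => []
  | b :: t, c => (c + if b then 1 else 0) :: psums t (c + if b then 1 else 0)

theorem altPrefix_fold (l : List Bool) (acc : List Int) (c : Int) :
    l.foldl
      (fun st b => (st.1 ++ [st.2 + (if b then 1 else 0)], st.2 + (if b then 1 else 0)))
      (acc, c)
      = (acc ++ psums l c, c + ((l.countP (fun b => b) : Nat) : Int)) := by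
  induction l generalizing acc c with
  | nil => simp [psums]
  | cons b t ih =>
    simp only [List.foldl_cons, psums, List.countP_cons]
    rw [ih]
    cases b <;> simp <;> ring

theorem psums_getElem? (l : List Bool) (c : Int) (k : Nat) (hk : k < l.length) :
    (psums l c)[k]? = some (c + (((l.take (k + 1)).countP (fun b => b) : Nat) : Int)) := by
  induction l generalizing c k with
  | nil => simp at hk
  | cons b t ih =>
    cases k with
    | zero => cases b <;> simp [psums]
    | succ k =>
      have := ih (c + if b then 1 else 0) k (by simpa using Nat.lt_of_succ_lt_succ hk)
      simp only [psums, List.getElem?_cons_succ, this, List.take_succ_cons, List.countP_cons]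
      cases b <;> simp <;> push_cast <;> ring

theorem altPrefix_eq (l : List Bool) : altPrefix l = 0 :: psums l 0 := by
  unfold altPrefix
  rw [altPrefix_fold]
  rfl

theorem length_psums (l : List Bool) (c : Int) : (psums l c).length = l.length := by
  induction l generalizing c with
  | nil => rfl
  | cons b t ih => simp [psums, ih]

theorem altPrefix_getElem? (l : List Bool) (k : Nat) (hk : k ≤ l.length) :
    (altPrefix l)[k]? = some (((l.take k).countP (fun b => b) : Nat) : Int) := by
  rw [altPrefix_eq]
  cases k with
  | zero => simp
  | succ k =>
    have hk' : k < l.length := Nat.lt_of_succ_le hk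
    simp [psums_getElem? l 0 k hk']

theorem pyGetD_altPrefix (l : List Bool) (i : Int) (h0 : 0 ≤ i) (h1 : i ≤ (l.length : Int)) :
    PySem.List.pyGetD (altPrefix l) i 0
      = (((l.take i.toNat).countP (fun b => b) : Nat) : Int) := by
  have hlen : (altPrefix l).length = l.length + 1 := by
    rw [altPrefix_eq]; simp [length_psums]
  have hi : i.toNat < (altPrefix l).length := by
    rw [hlen]; omega
  rw [PySem.List.pyGetD_eq_getElem (altPrefix l) 0 h0 (by rw [hlen]; push_cast; omega)]
  have := altPrefix_getElem? l i.toNat (by omega)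
  rw [List.getElem?_eq_getElem hi] at this
  exact Option.some.inj this

-- A's span_is_free equals B's prefix-sum condition.
theorem free_iff (s e : Int) (l : List Bool) :
    span_is_free s e l = true ↔
      (0 ≤ s ∧ s < e ∧ e ≤ (l.length : Int) ∧
        PySem.List.pyGetD (altPrefix l) s 0 = PySem.List.pyGetD (altPrefix l) e 0) := by
  unfold span_is_free
  by_cases hr : s < 0 ∨ e ≤ s ∨ (l.length : Int) < e
  · constructor
    · intro h
      exfalso
      rcases hr with h1 | h1 | h1 <;> simp [h1] at h <;> omega
    · intro ⟨h0, h1, h2, _⟩; omega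
  · push_neg at hr
    obtain ⟨h0, h1, h2⟩ := hr
    have hif : (decide (s < 0) || decide (e ≤ s) || decide ((l.length : Int) < e)) = false := by
      simp; omega
    rw [show (decide (s < 0) || decide (e ≤ s) || decide (e > (l.length : Int))) = false from hif]
    simp only [Bool.false_eq_true, if_false]
    have hs0 : (0:Int) ≤ s := by omega
    have he0 : (0:Int) ≤ e := by omega
    rw [PySem.List.slice_toNat l hs0 he0,
        pyGetD_altPrefix l s hs0 (by omega), pyGetD_altPrefix l e he0 h2]
    have hsplit : l.take e.toNat = l.take s.toNat ++ (l.drop s.toNat).take (e.toNat - s.toNat) := by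
      have : e.toNat = s.toNat + (e.toNat - s.toNat) := by omega
      rw [this, List.take_add]
      simp [Nat.add_sub_cancel_left]
    have hcount : (l.take e.toNat).countP (fun b => b)
        = (l.take s.toNat).countP (fun b => b)
          + ((l.drop s.toNat).take (e.toNat - s.toNat)).countP (fun b => b) := by
      rw [hsplit, List.countP_append]
    constructor
    · intro h
      refine ⟨hs0, by omega, h2, ?_⟩
      have hany : ((l.drop s.toNat).take (e.toNat - s.toNat)).any (fun b => b) = false := by
        cases hany : ((l.drop s.toNat).take (e.toNat - s.toNat)).any (fun b => b) <;>
          simp [hany] at h ⊢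
      have hz : ((l.drop s.toNat).take (e.toNat - s.toNat)).countP (fun b => b) = 0 := by
        rw [List.countP_eq_zero]
        intro a ha
        have := List.any_eq_false.mp hany a ha
        simpa using this
      rw [hcount, hz]
      push_cast; ring
    · intro ⟨_, _, _, hpre⟩
      have hz : ((l.drop s.toNat).take (e.toNat - s.toNat)).countP (fun b => b) = 0 := by
        rw [hcount] at hpre
        omega
      have : ((l.drop s.toNat).take (e.toNat - s.toNat)).any (fun b => b) = false := by
        rw [List.any_eq_false]
        intro a ha
        have := (List.countP_eq_zero.mp hz) a ha
        simpa using this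
      simp [this]

theorem loop_eq (l : List Bool) (cs : List (Int × Int)) :
    selLoop l cs = altLoop (altPrefix l) (l.length : Int) cs := by
  induction cs with
  | nil => rfl
  | cons p rest ih =>
    obtain ⟨s, e⟩ := p
    simp only [selLoop, altLoop]
    by_cases h : (0 ≤ s ∧ s < e ∧ e ≤ (l.length : Int) ∧
        PySem.List.pyGetD (altPrefix l) s 0 = PySem.List.pyGetD (altPrefix l) e 0)
    · rw [if_pos ((free_iff s e l).mpr h), if_pos h]
    · rw [if_neg (fun hb => h ((free_iff s e l).mp hb)), if_neg h, ih]

theorem neg_key_eq : (fun x : Int × Int => -(x.2 - x.1)) = (fun x : Int × Int => x.1 - x.2) := by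
  funext x; ring

-- ===== VERDICT (by name: the statement is the Claim_ definition above) =====
theorem select_non_overlapping_span_spec : Claim_equal_select_non_overlapping_span := by
  intro spans occupied prefer_right _
  unfold Spec_select_non_overlapping_span select_non_overlapping_span select_non_overlapping_span_alt
  simp only [dedupe_eq_ofList, neg_key_eq]
  by_cases hnil : PySem.Set.ofList spans = []
  · rw [if_pos hnil, hnil]
    cases prefer_right <;> simp <;> rfl
  · rw [if_neg hnil]
    cases prefer_right <;> simp only [if_true, if_false, Bool.false_eq_true] <;>
      exact loop_eq occupied _
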